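-- pv_equiv track=rewrite | github.com/biggmilkk/weathermonitor | scraper/nws_active_alerts.py | _infer_state_from_ugc
-- ===== SOURCE A (Python) =====
-- MARINE_PREFIXES = {"ANZ","AMZ","GMZ","PZZ","PHZ","PKZ","PMZ"}  # common marine groupings
--
-- def _infer_state_from_ugc(ugc_list) -> str | None:
--     """
--     Infer state/territory code from UGC codes.
--     Prefer marine grouping if any marine prefix present.
--     """
--     ugc_list = ugc_list or []
--     # Marine takes precedence if any zone is marine
--     for code in ugc_list:
--         if isinstance(code, str) and len(code) >= 3:
--             if code[:3] in MARINE_PREFIXES: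
--                 return "MAR"
--     # Otherwise take the first alpha 2-letter prefix
--     for code in ugc_list:
--         if isinstance(code, str) and len(code) >= 2 and code[:2].isalpha():
--             return code[:2]
--     return None
-- ===== SOURCE B (Python) =====
-- MARINE_PREFIXES = {"ANZ","AMZ","GMZ","PZZ","PHZ","PKZ","PMZ"}
--
-- def _infer_state_from_ugc(ugc_list) -> str | None:
--     """Single pass: remember the first alpha 2-letter prefix, but a marine
--     code anywhere in the list still wins immediately."""
--     first_alpha = None
--     for code in (ugc_list or []):
--         if isinstance(code, str) and len(code) >= 3 and code[:3] in MARINE_PREFIXES: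
--             return "MAR"
--         if first_alpha is None and isinstance(code, str) and len(code) >= 2 and code[:2].isalpha():
--             first_alpha = code[:2]
--     return first_alpha
-- ===== Notes on version B (the rewrite author's own statement) =====
-- stated objective: alternative
-- what changed: Fuses A's two scans (marine scan, then first-alpha scan) into one loop that carries a first_alpha accumulator while letting any later marine code still win.
import Mathlib
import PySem

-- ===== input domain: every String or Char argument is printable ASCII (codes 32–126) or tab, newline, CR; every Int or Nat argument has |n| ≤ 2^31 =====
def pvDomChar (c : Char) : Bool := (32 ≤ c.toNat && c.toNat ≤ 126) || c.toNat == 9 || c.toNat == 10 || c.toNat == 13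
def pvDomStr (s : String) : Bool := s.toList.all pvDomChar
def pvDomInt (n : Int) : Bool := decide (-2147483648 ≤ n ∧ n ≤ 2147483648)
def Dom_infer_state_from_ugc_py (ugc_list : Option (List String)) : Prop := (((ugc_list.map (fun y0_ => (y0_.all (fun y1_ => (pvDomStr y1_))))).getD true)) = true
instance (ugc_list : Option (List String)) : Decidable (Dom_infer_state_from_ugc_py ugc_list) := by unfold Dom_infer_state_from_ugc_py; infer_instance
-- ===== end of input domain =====

-- B fuses A's two scans into one loop with a first_alpha accumulator (alternative decomposition, same O(n) cost).

-- shared guard helpers (identical tests in both Pythons): 'len(code)>=3 and code[:3] in MARINE_PREFIXES'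
def pvMarinePrefixes : List String := ["ANZ", "AMZ", "GMZ", "PZZ", "PHZ", "PKZ", "PMZ"]
def pvIsMarine (c : String) : Bool :=
  decide (3 ≤ PySem.Str.len c) && pvMarinePrefixes.contains (PySem.Str.slice c none (some 3))
-- 'len(code)>=2 and code[:2].isalpha()'
def pvIsAlpha2 (c : String) : Bool :=
  decide (2 ≤ PySem.Str.len c) && PySem.Str.strIsalpha (PySem.Str.slice c none (some 2))

-- ===== PORT A =====
-- first loop of A: return "MAR" on the first marine code
def pvALoop1 : List String → Option String
  | [] => none
  | c :: rest => if pvIsMarine c then some "MAR" else pvALoop1 rest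
-- second loop of A: return the first alpha 2-letter prefix
def pvALoop2 : List String → Option String
  | [] => none
  | c :: rest => if pvIsAlpha2 c then some (PySem.Str.slice c none (some 2)) else pvALoop2 rest

def infer_state_from_ugc_py (ugc_list : Option (List String)) : Option String :=
  let l := ugc_list.getD []
  match pvALoop1 l with
  | some s => some s
  | none => pvALoop2 l

-- ===== PORT B =====
-- single pass carrying first_alpha; a marine code returns immediately
def pvBLoop : List String → Option String → Option String
  | [], firstAlpha => firstAlpha
  | c :: rest, firstAlpha =>
    if pvIsMarine c then some "MAR"
    else pvBLoop rest (if firstAlpha.isNone && pvIsAlpha2 c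
                       then some (PySem.Str.slice c none (some 2)) else firstAlpha)

def infer_state_from_ugc_py_alt (ugc_list : Option (List String)) : Option String :=
  pvBLoop (ugc_list.getD []) none

-- ===== PRECONDITION & SPEC =====
def Spec_infer_state_from_ugc_py (ugc_list : Option (List String)) (out : Option String) : Prop := out = infer_state_from_ugc_py_alt ugc_list
instance (ugc_list : Option (List String)) (out : Option String) : Decidable (Spec_infer_state_from_ugc_py ugc_list out) := by unfold Spec_infer_state_from_ugc_py; infer_instance

-- ===== CLAIM (what is proved, stated in full; the proofs are below) =====
def Claim_equal_infer_state_from_ugc_py : Prop := ∀ (ugc_list : Option (List String)), Dom_infer_state_from_ugc_py ugc_list → Spec_infer_state_from_ugc_py ugc_list (infer_state_from_ugc_py ugc_list)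

-- ===== LEMMAS AND PROOFS =====

-- the fused loop equals: marine anywhere wins, else the carried first_alpha, else A's second scan
theorem pvBLoop_eq (l : List String) (fa : Option String) :
    pvBLoop l fa =
      match pvALoop1 l with
      | some s => some s
      | none => match fa with
                | some x => some x
                | none => pvALoop2 l := by
  induction l generalizing fa with
  | nil => cases fa <;> simp [pvBLoop, pvALoop1, pvALoop2]
  | cons c rest ih =>
    by_cases hm : pvIsMarine c
    · simp [pvBLoop, pvALoop1, hm]
    · cases fa with
      | some x => simp [pvBLoop, pvALoop1, hm, ih]
      | none =>
        by_cases ha : pvIsAlpha2 c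
        · simp [pvBLoop, pvALoop1, pvALoop2, hm, ha, ih]
        · simp [pvBLoop, pvALoop1, pvALoop2, hm, ha, ih]

-- ===== VERDICT (by name: the statement is the Claim_ definition above) =====
theorem infer_state_from_ugc_py_spec : Claim_equal_infer_state_from_ugc_py := by
  intro ugc_list _
  unfold Spec_infer_state_from_ugc_py infer_state_from_ugc_py infer_state_from_ugc_py_alt
  rw [pvBLoop_eq]
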